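-- pv_equiv track=rewrite | github.com/Kepsr/pedigrad-library | Pedigrad/PartitionCategory/product.py | __coproduct_impl2
-- ===== SOURCE A (Python) =====
-- def __coproduct_impl2(xs: list, ys: list) -> list[int]:
--   classes = []
--   idxs = []
--   for x1, y1 in zip(xs, ys):
--     for i, cls in enumerate(classes):
--       if any(x1 == x2 or y1 == y2 for (x2, y2) in cls):
--         cls.append((x1, y1))
--         idxs.append(i)
--         break
--     else:
--       idxs.append(len(classes))
--       classes.append([(x1, y1)])
--   return idxs
-- ===== SOURCE B (Python) =====
-- def __coproduct_impl2(xs: list, ys: list) -> list[int]: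
--   # One pass: for each value, remember the smallest class index that contains it
--   # (as first or second component); the first matching class in A's scan is the
--   # minimum of those two indices, or a fresh class when neither value was seen.
--   xmin = {}
--   ymin = {}
--   n = 0
--   idxs = []
--   for x, y in zip(xs, ys):
--     i = min(xmin.get(x, n), ymin.get(y, n))
--     idxs.append(i)
--     if i == n:
--       n += 1
--     xmin[x] = i
--     ymin[y] = i
--   return idxs
-- ===== Notes on version B (the rewrite author's own statement) =====
-- stated objective: faster
-- what changed: Replaces the scan over all classes with all their members by two hash maps value->minimal class index, so each element is classified with two O(1) lookups and the class lists are never materialised.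
import Mathlib
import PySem

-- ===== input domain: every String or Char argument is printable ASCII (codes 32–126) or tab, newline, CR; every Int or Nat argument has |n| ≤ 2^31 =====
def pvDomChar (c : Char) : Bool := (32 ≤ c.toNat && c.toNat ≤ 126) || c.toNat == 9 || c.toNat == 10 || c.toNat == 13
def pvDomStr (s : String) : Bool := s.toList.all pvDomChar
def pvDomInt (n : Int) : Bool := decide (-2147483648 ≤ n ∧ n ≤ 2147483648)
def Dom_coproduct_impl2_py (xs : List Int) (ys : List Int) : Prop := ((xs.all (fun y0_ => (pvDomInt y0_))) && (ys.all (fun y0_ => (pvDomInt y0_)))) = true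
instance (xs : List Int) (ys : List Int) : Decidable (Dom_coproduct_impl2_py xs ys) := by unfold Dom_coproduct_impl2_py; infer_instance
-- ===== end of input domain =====

-- B replaces A's scan over all classes and their members by two hash maps
-- value -> minimal class index (objective: faster, asymptotic).

-- ===== PORT A =====
-- inner 'for i, cls in enumerate(classes): if any(...): break'
def pvFindMatch (x1 y1 : Int) : List (List (Int × Int)) → Nat → Option Nat
  | [], _ => none
  | cls :: rest, i =>
      if cls.any (fun q => q.1 == x1 || q.2 == y1) then some i
      else pvFindMatch x1 y1 rest (i + 1)

-- one iteration of A's outer loop: state = (classes, idxs)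
def pvStepA (st : List (List (Int × Int)) × List Int) (p : Int × Int) :
    List (List (Int × Int)) × List Int :=
  match pvFindMatch p.1 p.2 st.1 0 with
  | some i => (st.1.modify i (· ++ [p]), st.2 ++ [(i : Int)])
  | none => (st.1 ++ [[p]], st.2 ++ [(st.1.length : Int)])

def coproduct_impl2_py (xs : List Int) (ys : List Int) : List Int :=
  ((xs.zip ys).foldl pvStepA ([], [])).2

-- ===== PORT B =====
-- one iteration of B's loop: state = (xmin, ymin, n, idxs)
def pvStepB (st : PySem.Dict Int Int × PySem.Dict Int Int × Int × List Int) (p : Int × Int) :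
    PySem.Dict Int Int × PySem.Dict Int Int × Int × List Int :=
  match st with
  | (xm, ym, n, idxs) =>
    let i := min (xm.getD p.1 n) (ym.getD p.2 n)
    let n' := if i = n then n + 1 else n
    (xm.insert p.1 i, ym.insert p.2 i, n', idxs ++ [i])

def coproduct_impl2_py_alt (xs : List Int) (ys : List Int) : List Int :=
  ((xs.zip ys).foldl pvStepB (PySem.Dict.empty, PySem.Dict.empty, 0, [])).2.2.2

-- ===== PRECONDITION & SPEC =====
def Spec_coproduct_impl2_py (xs : List Int) (ys : List Int) (out : List Int) : Prop := out = coproduct_impl2_py_alt xs ys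
instance (xs : List Int) (ys : List Int) (out : List Int) : Decidable (Spec_coproduct_impl2_py xs ys out) := by unfold Spec_coproduct_impl2_py; infer_instance

-- ===== CLAIM (what is proved, stated in full; the proofs are below) =====
def Claim_equal_coproduct_impl2_py : Prop := ∀ (xs : List Int) (ys : List Int), Dom_coproduct_impl2_py xs ys → Spec_coproduct_impl2_py xs ys (coproduct_impl2_py xs ys)

-- ===== LEMMAS AND PROOFS =====

-- index of the first class whose members satisfy P (= length if none does)
def pvFirst (P : Int × Int → Bool) : List (List (Int × Int)) → Nat
  | [] => 0
  | cls :: rest => if cls.any P then 0 else pvFirst P rest + 1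

lemma pvFirst_le (P : Int × Int → Bool) (cs : List (List (Int × Int))) :
    pvFirst P cs ≤ cs.length := by
  induction cs with
  | nil => simp [pvFirst]
  | cons c rest ih => simp only [pvFirst, List.length_cons]; split <;> omega

lemma pvAny_or (P Q : Int × Int → Bool) (c : List (Int × Int)) :
    c.any (fun q => P q || Q q) = (c.any P || c.any Q) := by
  induction c with
  | nil => rfl
  | cons a t ih => simp [List.any_cons, ih, Bool.or_assoc, Bool.or_left_comm]

lemma pvFirst_or (P Q : Int × Int → Bool) (cs : List (List (Int × Int))) :
    pvFirst (fun q => P q || Q q) cs = min (pvFirst P cs) (pvFirst Q cs) := by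
  induction cs with
  | nil => simp [pvFirst]
  | cons c rest ih =>
    simp only [pvFirst, pvAny_or, ih]
    cases hp : c.any P <;> cases hq : c.any Q <;> simp [Nat.succ_min_succ]

lemma pvFindMatch_eq (x y : Int) (cs : List (List (Int × Int))) (k : Nat) :
    pvFindMatch x y cs k =
      if pvFirst (fun q => q.1 == x || q.2 == y) cs < cs.length
      then some (k + pvFirst (fun q => q.1 == x || q.2 == y) cs) else none := by
  induction cs generalizing k with
  | nil => simp [pvFindMatch, pvFirst]
  | cons c rest ih =>
    simp only [pvFindMatch, pvFirst, List.length_cons]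
    split
    · simp
    · rw [ih]
      by_cases h : pvFirst (fun q => q.1 == x || q.2 == y) rest < rest.length
      · rw [if_pos h, if_pos (by omega)]
        congr 1
        omega
      · rw [if_neg h, if_neg (by omega)]

lemma pvFirst_modify_ne (P : Int × Int → Bool) (p : Int × Int) (hP : P p = false)
    (cs : List (List (Int × Int))) (i : Nat) :
    pvFirst P (cs.modify i (· ++ [p])) = pvFirst P cs := by
  induction cs generalizing i with
  | nil => simp
  | cons c rest ih =>
    cases i with
    | zero =>
      simp only [List.modify_zero_cons, pvFirst, List.any_append, List.any_cons, List.any_nil,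
        hP, Bool.or_false]
    | succ j =>
      rw [List.modify_succ_cons]
      simp only [pvFirst, ih]

lemma pvFirst_modify_self (P : Int × Int → Bool) (p : Int × Int) (hP : P p = true)
    (cs : List (List (Int × Int))) (i : Nat) (hle : i ≤ pvFirst P cs) (hlt : i < cs.length) :
    pvFirst P (cs.modify i (· ++ [p])) = i := by
  induction cs generalizing i with
  | nil => simp at hlt
  | cons c rest ih =>
    cases i with
    | zero =>
      rw [List.modify_zero_cons]
      simp only [pvFirst, List.any_append, List.any_cons, List.any_nil, hP, Bool.or_true,
        Bool.or_false]
      simp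
    | succ j =>
      have hc : c.any P = false := by
        cases hca : c.any P with
        | false => rfl
        | true => simp only [pvFirst, hca, if_true] at hle; omega
      have hle' : j ≤ pvFirst P rest := by
        simp only [pvFirst, hc] at hle
        simp at hle
        omega
      rw [List.modify_succ_cons]
      simp only [pvFirst, hc]
      rw [ih j hle' (by simp only [List.length_cons] at hlt; omega)]
      simp

lemma pvFirst_append (P : Int × Int → Bool) (cs : List (List (Int × Int))) (c : List (Int × Int)) :
    pvFirst P (cs ++ [c]) =
      if pvFirst P cs < cs.length then pvFirst P cs
      else if c.any P then cs.length else cs.length + 1 := by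
  induction cs with
  | nil => simp [pvFirst]
  | cons c0 rest ih =>
    have hle := pvFirst_le P rest
    rw [List.cons_append]
    simp only [pvFirst, List.length_cons, ih]
    split_ifs <;> omega

-- the dict invariant: d maps each value v to the first class index whose selected
-- component equals v, and contains v iff some class does
def pvInv (f : Int × Int → Int) (d : PySem.Dict Int Int) (cs : List (List (Int × Int))) : Prop :=
  ∀ x : Int, d.get? x =
    if pvFirst (fun q => f q == x) cs < cs.length
    then some ((pvFirst (fun q => f q == x) cs : Int)) else none

lemma pvInv_getD (f : Int × Int → Int) (d : PySem.Dict Int Int) (cs : List (List (Int × Int)))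
    (h : pvInv f d cs) (x : Int) :
    d.getD x (cs.length : Int) = ((pvFirst (fun q => f q == x) cs : Int)) := by
  rw [PySem.Dict.getD_eq_get?_getD, h x]
  split
  · rfl
  · have := pvFirst_le (fun q => f q == x) cs
    simp only [Option.getD_none]
    omega

lemma pvInv_insert (f : Int × Int → Int) (d : PySem.Dict Int Int) (cs : List (List (Int × Int)))
    (p : Int × Int) (i : Nat) (h : pvInv f d cs)
    (hle : i ≤ pvFirst (fun q => f q == f p) cs) (hlt : i < cs.length) :
    pvInv f (d.insert (f p) (i : Int)) (cs.modify i (· ++ [p])) := by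
  intro x
  rw [PySem.Dict.get?_insert]
  by_cases hx : x = f p
  · subst hx
    rw [pvFirst_modify_self _ p (by simp) cs i hle hlt]
    simp [hlt]
  · rw [pvFirst_modify_ne _ p (by simp [Ne.symm hx]) cs i]
    simp [hx, h x]

lemma pvInv_append (f : Int × Int → Int) (d : PySem.Dict Int Int) (cs : List (List (Int × Int)))
    (p : Int × Int) (h : pvInv f d cs)
    (hnf : pvFirst (fun q => f q == f p) cs = cs.length) :
    pvInv f (d.insert (f p) (cs.length : Int)) (cs ++ [[p]]) := by
  intro x
  rw [PySem.Dict.get?_insert, pvFirst_append]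
  by_cases hx : x = f p
  · subst hx
    simp [hnf]
  · have hget := h x
    simp only [hx, if_false, List.any_cons, List.any_nil, Bool.or_false]
    have hne : (f p == x) = false := by simp [Ne.symm hx]
    by_cases hf : pvFirst (fun q => f q == x) cs < cs.length
    · simp [hf, hget, List.length_append]; omega
    · have := pvFirst_le (fun q => f q == x) cs
      have heq : pvFirst (fun q => f q == x) cs = cs.length := by omega
      simp [hget, hne, heq, List.length_append]

lemma pvLoop (l : List (Int × Int)) :
    ∀ (cs : List (List (Int × Int))) (xm ym : PySem.Dict Int Int) (idxs : List Int),
    pvInv (fun q => q.1) xm cs → pvInv (fun q => q.2) ym cs →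
    (l.foldl pvStepA (cs, idxs)).2 =
      (l.foldl pvStepB (xm, ym, (cs.length : Int), idxs)).2.2.2 := by
  induction l with
  | nil => intro cs xm ym idxs _ _; rfl
  | cons p l ih =>
    intro cs xm ym idxs hx hy
    simp only [List.foldl_cons]
    have hFx := pvInv_getD _ _ _ hx p.1
    have hFy := pvInv_getD _ _ _ hy p.2
    set Fx := pvFirst (fun q => q.1 == p.1) cs with hFxdef
    set Fy := pvFirst (fun q => q.2 == p.2) cs with hFydef
    have hM : pvFirst (fun q => q.1 == p.1 || q.2 == p.2) cs = min Fx Fy :=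
      pvFirst_or _ _ cs
    have hBi : min (xm.getD p.1 (cs.length : Int)) (ym.getD p.2 (cs.length : Int))
        = ((min Fx Fy : Nat) : Int) := by
      rw [hFx, hFy, ← Nat.cast_min]
    have hxle := pvFirst_le (fun q => q.1 == p.1) cs
    have hyle := pvFirst_le (fun q => q.2 == p.2) cs
    by_cases hlt : min Fx Fy < cs.length
    · -- matched: A appends to class (min Fx Fy), B keeps n
      have hA : pvStepA (cs, idxs) p =
          (cs.modify (min Fx Fy) (· ++ [p]), idxs ++ [((min Fx Fy : Nat) : Int)]) := by
        simp only [pvStepA, pvFindMatch_eq, hM, hlt, if_true, Nat.zero_add]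
      have hB : pvStepB (xm, ym, (cs.length : Int), idxs) p =
          (xm.insert p.1 ((min Fx Fy : Nat) : Int), ym.insert p.2 ((min Fx Fy : Nat) : Int),
           (cs.length : Int), idxs ++ [((min Fx Fy : Nat) : Int)]) := by
        have hne : ¬ (((min Fx Fy : Nat) : Int) = (cs.length : Int)) := by omega
        simp only [pvStepB, hBi]
        rw [if_neg hne]
      rw [hA, hB]
      have hlen : ((cs.modify (min Fx Fy) (· ++ [p])).length : Int) = (cs.length : Int) := by
        simp
      rw [← hlen]
      exact ih _ _ _ _
        (pvInv_insert _ _ _ p _ hx (Nat.min_le_left _ _) hlt)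
        (pvInv_insert _ _ _ p _ hy (Nat.min_le_right _ _) hlt)
    · -- no match: A opens a new class, B bumps n
      have hFxe : Fx = cs.length := by omega
      have hFye : Fy = cs.length := by omega
      have hMe : min Fx Fy = cs.length := by omega
      have hA : pvStepA (cs, idxs) p = (cs ++ [[p]], idxs ++ [(cs.length : Int)]) := by
        simp only [pvStepA, pvFindMatch_eq, hM, hMe, lt_irrefl, if_false]
      have hB : pvStepB (xm, ym, (cs.length : Int), idxs) p =
          (xm.insert p.1 (cs.length : Int), ym.insert p.2 (cs.length : Int),
           (cs.length : Int) + 1, idxs ++ [(cs.length : Int)]) := by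
        simp only [pvStepB, hBi, hMe]
        simp
      rw [hA, hB]
      have hlen : ((cs ++ [[p]]).length : Int) = (cs.length : Int) + 1 := by simp
      rw [← hlen]
      exact ih _ _ _ _ (pvInv_append _ _ _ p hx hFxe) (pvInv_append _ _ _ p hy hFye)

-- ===== VERDICT (by name: the statement is the Claim_ definition above) =====
theorem coproduct_impl2_py_spec : Claim_equal_coproduct_impl2_py := by
  intro xs ys _
  unfold Spec_coproduct_impl2_py coproduct_impl2_py coproduct_impl2_py_alt
  have h := pvLoop (xs.zip ys) [] PySem.Dict.empty PySem.Dict.empty []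
    (by intro x; simp [pvFirst, PySem.Dict.get?_empty])
    (by intro x; simp [pvFirst, PySem.Dict.get?_empty])
  simpa using h
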